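-- pv_equiv track=rewrite | github.com/anri-Tvalabeishvili/Challenges | 054 Problem.py | sum_index_finder
-- ===== SOURCE A (Python) =====
-- def sum_index_finder(combnation):
--     number = [str(i) for i in range(1,11)]
--
--     sum = 0
--     sum_index = ""
--     for i in combnation:
--         if i in number or i == "T":
--
--             if i =="T":
--                 sum += 10
--                 continue
--
--             sum += int(i)
--         else:
--             sum_index += i
--
--
--     return (str(sum) + sum_index)
-- ===== SOURCE B (Python) =====
-- def sum_index_finder(combnation):
--     total = 10 * combnation.count("T") + sum(
--         int(d) * combnation.count(d) for d in "123456789")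
--     rest = combnation.translate(str.maketrans("", "", "123456789T"))
--     return str(total) + rest
-- ===== Notes on version B (the rewrite author's own statement) =====
-- stated objective: faster
-- what changed: Replaces A's single char-by-char Python loop with mutable sum/string accumulators by per-symbol counting: str.count for each counted symbol ('T' and '1'..'9') multiplied by its value, and str.translate with a delete table for the leftover characters.
import Mathlib
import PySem

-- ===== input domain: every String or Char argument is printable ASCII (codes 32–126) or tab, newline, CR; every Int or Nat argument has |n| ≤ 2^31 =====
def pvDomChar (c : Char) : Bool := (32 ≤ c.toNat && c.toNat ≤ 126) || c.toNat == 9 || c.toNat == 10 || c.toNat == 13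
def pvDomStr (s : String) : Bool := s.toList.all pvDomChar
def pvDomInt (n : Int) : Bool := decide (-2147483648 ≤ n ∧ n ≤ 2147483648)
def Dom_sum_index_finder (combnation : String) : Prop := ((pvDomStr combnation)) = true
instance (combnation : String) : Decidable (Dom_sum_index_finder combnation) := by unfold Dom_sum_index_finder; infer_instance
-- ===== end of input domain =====

-- B replaces A's single char-by-char loop with mutable accumulators by per-symbol
-- counting (str.count for each of 'T','1'..'9', multiplied by its value) plus a
-- translate-delete for the leftover characters (objective: faster; a timing run
-- measured B faster — the per-symbol scans run in C instead of a Python-level loop).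

-- ===== PORT A =====
-- int(i) for a one-character string i (A's branch guarantees i is a digit '1'-'9')
def pvIntOfChar (c : Char) : Int := (PySem.Int.ofChars? [c]).getD 0

def sum_index_finder (combnation : String) : String :=
  let number : List String := (PySem.List.pyRange 1 11 1).map PySem.Int.toStr
  let p : Int × List Char := combnation.toList.foldl
    (fun (s : Int × List Char) i =>
      if String.ofList [i] ∈ number ∨ i = 'T' then
        if i = 'T' then (s.1 + 10, s.2)
        else (s.1 + pvIntOfChar i, s.2)
      else (s.1, s.2 ++ [i]))
    (0, [])
  String.ofList (PySem.Int.toChars p.1 ++ p.2)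

-- ===== PORT B =====
def sum_index_finder_alt (combnation : String) : String :=
  let total : Int :=
    10 * (PySem.Str.count combnation "T" : Int)
      + (("123456789".toList).map
          (fun d => pvIntOfChar d * (PySem.Str.count combnation (String.ofList [d]) : Int))).sum
  -- str.translate with a delete-only table built by str.maketrans("","","123456789T")
  -- is ported by hand as a filter dropping exactly those characters (exact).
  let rest : List Char := combnation.toList.filter (fun c => decide (c ∉ "123456789T".toList))
  String.ofList (PySem.Int.toChars total ++ rest)

-- ===== PRECONDITION & SPEC =====
def Spec_sum_index_finder (combnation : String) (out : String) : Prop := out = sum_index_finder_alt combnation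
instance (combnation : String) (out : String) : Decidable (Spec_sum_index_finder combnation out) := by unfold Spec_sum_index_finder; infer_instance

-- ===== CLAIM =====
def Claim_equal_sum_index_finder : Prop := ∀ (combnation : String), Dom_sum_index_finder combnation → Spec_sum_index_finder combnation (sum_index_finder combnation)

-- ===== LEMMAS AND PROOFS =====

-- A's loop over cs, started at (s, r), adds the filtered sum to s and appends the filtered rest to r.
theorem pv_loop_split (L : List String) (cs : List Char) (s : Int) (r : List Char) :
    cs.foldl
      (fun (s : Int × List Char) i =>
        if String.ofList [i] ∈ L ∨ i = 'T' then
          if i = 'T' then (s.1 + 10, s.2)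
          else (s.1 + pvIntOfChar i, s.2)
        else (s.1, s.2 ++ [i]))
      (s, r)
    = (s + ((cs.filter (fun c => decide (c = 'T' ∨ String.ofList [c] ∈ L))).map
              (fun c => if c = 'T' then (10 : Int) else pvIntOfChar c)).sum,
       r ++ cs.filter (fun c => decide (¬ c = 'T' ∧ String.ofList [c] ∉ L))) := by
  induction cs generalizing s r with
  | nil => simp
  | cons c cs ih =>
    by_cases hT : c = 'T'
    · subst hT
      simp [ih]
      ring
    · by_cases hm : String.ofList [c] ∈ L
      · simp [hT, hm, ih]
        ring
      · simp [hT, hm, ih]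

-- Chars.count.go with a single-character needle counts occurrences of that character.
theorem pv_count_go_singleton (c : Char) : ∀ (l : List Char) (fuel acc : Nat),
    l.length ≤ fuel → PySem.Chars.count.go [c] fuel l acc = acc + l.count c := by
  intro l
  induction l with
  | nil => intro fuel acc _; cases fuel <;> simp [PySem.Chars.count.go]
  | cons h t ih =>
    intro fuel acc hf
    cases fuel with
    | zero => simp at hf
    | succ f =>
      have hf' : t.length ≤ f := by simpa using hf
      by_cases hc : h = c
      · subst hc
        have hp : List.isPrefixOf [h] (h :: t) = true := by simp [List.isPrefixOf]
        simp [PySem.Chars.count.go, hp, ih f (acc + 1) hf']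
        omega
      · have hp : List.isPrefixOf [c] (h :: t) = false := by
          simp [List.isPrefixOf, Ne.symm hc]
        simp [PySem.Chars.count.go, hp, ih f acc hf', hc]

-- str.count with a single-character needle is List.count of that character.
theorem pv_count_singleton (s : List Char) (c : Char) :
    PySem.Chars.count s [c] = s.count c := by
  have h := pv_count_go_singleton c s s.length 0 (le_refl _)
  simp [PySem.Chars.count, h]

-- A's membership test "i in number" holds exactly for the digit characters '1'..'9'.
theorem pv_mem_number (c : Char) :
    (String.ofList [c] ∈ (PySem.List.pyRange 1 11 1).map PySem.Int.toStr) ↔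
      c ∈ "123456789".toList := by
  have h : (PySem.List.pyRange 1 11 1).map PySem.Int.toStr
      = ["1", "2", "3", "4", "5", "6", "7", "8", "9", "10"] := by decide
  rw [h]
  constructor
  · intro hm
    simp only [List.mem_cons, List.not_mem_nil, or_false] at hm
    rcases hm with h1|h1|h1|h1|h1|h1|h1|h1|h1|h1 <;>
      first
        | (have h2 := congrArg String.toList h1; simp at h2; subst h2; decide)
        | (exact absurd (congrArg String.toList h1) (by simp))
  · intro hm
    have : c = '1' ∨ c = '2' ∨ c = '3' ∨ c = '4' ∨ c = '5' ∨ c = '6' ∨ c = '7' ∨ c = '8' ∨ c = '9' := by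
      simpa using hm
    rcases this with rfl|rfl|rfl|rfl|rfl|rfl|rfl|rfl|rfl <;> decide

-- Distributing one extra occurrence of c over a nodup list of counted symbols.
theorem pv_sum_bump (v : Char → Int) (cnt : Char → Int) (c : Char) :
    ∀ (D : List Char), D.Nodup →
    (D.map (fun d => v d * (cnt d + if d = c then 1 else 0))).sum
      = (D.map (fun d => v d * cnt d)).sum + (if c ∈ D then v c else 0) := by
  intro D
  induction D with
  | nil => simp
  | cons d D ih =>
    intro hD
    have hnd := List.nodup_cons.mp hD
    simp only [List.map_cons, List.sum_cons, List.mem_cons]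
    rw [ih hnd.2]
    by_cases hcd : d = c
    · subst hcd
      simp [hnd.1]
      ring
    · by_cases hm : c ∈ D
      · simp [hcd, Ne.symm hcd, hm]
        ring
      · simp [hcd, Ne.symm hcd, hm]

-- The filtered sum of A equals B's per-symbol counted sum.
theorem pv_filter_sum (D : List Char) (hD : D.Nodup) (hTD : 'T' ∉ D) :
    ∀ cs : List Char,
    ((cs.filter (fun c => decide (c = 'T' ∨ c ∈ D))).map
        (fun c => if c = 'T' then (10 : Int) else pvIntOfChar c)).sum
    = 10 * (cs.count 'T' : Int)
      + (D.map (fun d => pvIntOfChar d * (cs.count d : Int))).sum := by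
  intro cs
  induction cs with
  | nil => simp
  | cons c cs ih =>
    have hmap : D.map (fun d => pvIntOfChar d * (((c :: cs).count d : Int)))
        = D.map (fun d => pvIntOfChar d * ((cs.count d : Int) + if d = c then 1 else 0)) := by
      apply List.map_congr_left
      intro d _
      rw [List.count_cons]
      by_cases hdc : d = c
      · subst hdc; simp
      · simp [hdc, Ne.symm hdc]
    rw [List.filter_cons, hmap, pv_sum_bump _ _ _ D hD]
    by_cases hTc : c = 'T'
    · subst hTc
      simp [hTD] at ih ⊢
      linear_combination ih
    · by_cases hm : c ∈ D
      · simp [hTc, hm] at ih ⊢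
        linear_combination ih
      · simp [hTc, hm] at ih ⊢
        linear_combination ih

-- A's leftover characters are exactly those not deleted by B's translate table.
theorem pv_filter_rest (cs : List Char) :
    cs.filter (fun c => decide (¬ c = 'T' ∧ String.ofList [c] ∉ (PySem.List.pyRange 1 11 1).map PySem.Int.toStr))
      = cs.filter (fun c => decide (c ∉ "123456789T".toList)) := by
  apply List.filter_congr
  intro c _
  simp only [decide_eq_decide, pv_mem_number]
  constructor
  · rintro ⟨h1, h2⟩ hmem
    have : c = '1' ∨ c = '2' ∨ c = '3' ∨ c = '4' ∨ c = '5' ∨ c = '6' ∨ c = '7' ∨ c = '8' ∨ c = '9' ∨ c = 'T' := by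
      simpa using hmem
    rcases this with rfl|rfl|rfl|rfl|rfl|rfl|rfl|rfl|rfl|rfl
    all_goals first | exact h1 rfl | exact h2 (by decide)
  · intro h
    refine ⟨fun hc => h ?_, fun hc => h ?_⟩
    · subst hc; decide
    · have : c = '1' ∨ c = '2' ∨ c = '3' ∨ c = '4' ∨ c = '5' ∨ c = '6' ∨ c = '7' ∨ c = '8' ∨ c = '9' := by
        simpa using hc
      rcases this with rfl|rfl|rfl|rfl|rfl|rfl|rfl|rfl|rfl <;> decide

-- ===== VERDICT =====
theorem sum_index_finder_spec : Claim_equal_sum_index_finder := by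
  intro combnation _
  show _ = _
  unfold sum_index_finder sum_index_finder_alt
  simp only [pv_loop_split, Int.zero_add, List.nil_append]
  have hfs : combnation.toList.filter
        (fun c => decide (c = 'T' ∨ String.ofList [c] ∈ (PySem.List.pyRange 1 11 1).map PySem.Int.toStr))
      = combnation.toList.filter (fun c => decide (c = 'T' ∨ c ∈ "123456789".toList)) := by
    apply List.filter_congr
    intro c _
    simp [pv_mem_number]
  rw [hfs, pv_filter_rest, pv_filter_sum "123456789".toList (by decide) (by decide)]
  simp [PySem.Str.count_eq, pv_count_singleton]
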